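-- pv_equiv track=rewrite | github.com/mikaelnr/Attempting-to-Solve-Nim-with-Machine-Learning | SpaceSaveSarsaSpread.py | newState
-- ===== SOURCE A (Python) =====
-- def newState(heapIndex, amount, state):
-- 	curState = state[:]
-- 	curAmount = amount
-- 	for i in range(heapIndex, len(state)-1):
-- 		dif = curState[i] - curState[i+1]
-- 		if (dif >= curAmount):
-- 			curState[i] -= curAmount
-- 			curAmount = 0
-- 			break
-- 		else:
-- 			curState[i] -= dif
-- 			curAmount -= dif
-- 	if (curAmount > 0):
-- 		curState[len(curState)-1] -= curAmount
-- 	return curState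
-- ===== SOURCE B (Python) =====
-- def newState(heapIndex, amount, state):
--     n = len(state)
--     # find the first j where leveling heaps heapIndex..j-1 frees enough: state[heapIndex]-state[j+1] >= amount
--     for j in range(heapIndex, n - 1):
--         if state[heapIndex] - state[j + 1] >= amount:
--             # heaps heapIndex..j-1 take their right neighbour's value, heap j absorbs the rest
--             return state[:heapIndex] + state[heapIndex + 1:j + 1] + [state[heapIndex] - amount] + state[j + 1:]
--     if heapIndex < n - 1:
--         # not enough leveling capacity: level all heaps from heapIndex and push the remainder onto the last one
--         return state[:heapIndex] + state[heapIndex + 1:] + [state[heapIndex] - amount]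
--     result = list(state)
--     if amount > 0:
--         result[-1] -= amount
--     return result
-- ===== Notes on version B (the rewrite author's own statement) =====
-- stated objective: alternative
-- what changed: A mutates a copy element-by-element, repeatedly subtracting running differences; B first scans for the single threshold index where the cumulative leveling capacity state[heapIndex]-state[j+1] reaches amount (the running sums telescope), then builds the result in one concatenation of untouched slices plus the closed-form value state[heapIndex]-amount.
-- outside the precondition, e.g. on newState(-1, 1, [5, 3]): A returns [5, 2], B returns [5, 5, 3, 2]
import Mathlib
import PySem

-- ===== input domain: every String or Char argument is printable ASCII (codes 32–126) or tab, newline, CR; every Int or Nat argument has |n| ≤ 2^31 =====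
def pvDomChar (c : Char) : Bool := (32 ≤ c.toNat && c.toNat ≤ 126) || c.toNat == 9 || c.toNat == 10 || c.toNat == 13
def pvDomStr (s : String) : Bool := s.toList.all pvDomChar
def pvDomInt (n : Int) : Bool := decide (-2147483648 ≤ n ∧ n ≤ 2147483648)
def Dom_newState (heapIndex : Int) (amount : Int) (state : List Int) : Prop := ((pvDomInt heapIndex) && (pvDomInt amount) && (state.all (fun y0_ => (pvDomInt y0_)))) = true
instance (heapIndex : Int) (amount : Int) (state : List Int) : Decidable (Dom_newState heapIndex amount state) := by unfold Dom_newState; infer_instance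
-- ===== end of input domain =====

-- B rebuilds the result in one concatenation from the first index where leveling frees enough,
-- instead of A's element-by-element in-place subtraction loop (objective: alternative decomposition).

-- ===== PORT A =====
-- the 'for i in range(heapIndex, len(state)-1)' loop with its break, threaded through (curState, curAmount);
-- pyGetD/pySetD with a default are exact for in-range indices, which Pre_newState guarantees
def newStateGo (idxs : List Int) (cur : List Int) (curAmount : Int) : List Int × Int :=
  match idxs with
  | [] => (cur, curAmount)
  | i :: rest =>
    if PySem.List.pyGetD cur i 0 - PySem.List.pyGetD cur (i + 1) 0 ≥ curAmount then
      (PySem.List.pySetD cur i (PySem.List.pyGetD cur i 0 - curAmount), 0)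
    else
      newStateGo rest
        (PySem.List.pySetD cur i
          (PySem.List.pyGetD cur i 0 - (PySem.List.pyGetD cur i 0 - PySem.List.pyGetD cur (i + 1) 0)))
        (curAmount - (PySem.List.pyGetD cur i 0 - PySem.List.pyGetD cur (i + 1) 0))

def newState (heapIndex : Int) (amount : Int) (state : List Int) : List Int :=
  if (newStateGo (PySem.List.pyRange heapIndex ((state.length : Int) - 1) 1) state amount).2 > 0 then
    PySem.List.pySetD (newStateGo (PySem.List.pyRange heapIndex ((state.length : Int) - 1) 1) state amount).1
      (((newStateGo (PySem.List.pyRange heapIndex ((state.length : Int) - 1) 1) state amount).1.length : Int) - 1)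
      (PySem.List.pyGetD (newStateGo (PySem.List.pyRange heapIndex ((state.length : Int) - 1) 1) state amount).1
        (((newStateGo (PySem.List.pyRange heapIndex ((state.length : Int) - 1) 1) state amount).1.length : Int) - 1) 0
       - (newStateGo (PySem.List.pyRange heapIndex ((state.length : Int) - 1) 1) state amount).2)
  else (newStateGo (PySem.List.pyRange heapIndex ((state.length : Int) - 1) 1) state amount).1

def newState_alt (heapIndex : Int) (amount : Int) (state : List Int) : List Int :=
  match (PySem.List.pyRange heapIndex ((state.length : Int) - 1) 1).find?
      (fun j => decide (PySem.List.pyGetD state heapIndex 0 - PySem.List.pyGetD state (j + 1) 0 ≥ amount)) with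
  | some j =>
      PySem.List.slice state none (some heapIndex)
        ++ PySem.List.slice state (some (heapIndex + 1)) (some (j + 1))
        ++ [PySem.List.pyGetD state heapIndex 0 - amount]
        ++ PySem.List.slice state (some (j + 1)) none
  | none =>
      if heapIndex < (state.length : Int) - 1 then
        PySem.List.slice state none (some heapIndex)
          ++ PySem.List.slice state (some (heapIndex + 1)) none
          ++ [PySem.List.pyGetD state heapIndex 0 - amount]
      else if amount > 0 then
        PySem.List.pySetD state (-1) (PySem.List.pyGetD state (-1) 0 - amount)
      else state


-- ===== PRECONDITION & SPEC =====
-- Pre_ restricts A to its natural domain: heapIndex must be a nonnegative heap index (A's value on a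
-- negative heapIndex is accidental negative-index wraparound), and on the empty state with amount > 0
-- A raises IndexError.
def Pre_newState (heapIndex : Int) (amount : Int) (state : List Int) : Prop :=
  0 ≤ heapIndex ∧ (state = [] → amount ≤ 0)
instance (heapIndex : Int) (amount : Int) (state : List Int) : Decidable (Pre_newState heapIndex amount state) := by
  unfold Pre_newState; infer_instance

def pvWitness_newState : Int × Int × List Int := (0, 2, [5, 3, 1])

def Spec_newState (heapIndex : Int) (amount : Int) (state : List Int) (out : List Int) : Prop := out = newState_alt heapIndex amount state
instance (heapIndex : Int) (amount : Int) (state : List Int) (out : List Int) : Decidable (Spec_newState heapIndex amount state out) := by unfold Spec_newState; infer_instance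

-- ===== CLAIM (what is proved, stated in full; the proofs are below) =====
def Claim_equal_newState : Prop := ∀ (heapIndex : Int) (amount : Int) (state : List Int), Dom_newState heapIndex amount state → Pre_newState heapIndex amount state → Spec_newState heapIndex amount state (newState heapIndex amount state)

-- ===== LEMMAS AND PROOFS =====

lemma pv_find?_congr {α : Type} (l : List α) (p q : α → Bool) (h : ∀ x ∈ l, p x = q x) :
    l.find? p = l.find? q := by
  induction l with
  | nil => rfl
  | cons a t ih =>
    simp only [List.find?]
    rw [h a (by simp)]
    cases q a
    · exact ih (fun x hx => h x (by simp [hx]))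
    · rfl

lemma pv_getD_set_ne (xs : List Int) (i j : Nat) (v : Int) (hij : i ≠ j) :
    (xs.set i v).getD j 0 = xs.getD j 0 := by
  simp [List.getD, List.getElem?_set_ne hij]

lemma pv_take_succ_set (xs : List Int) (i : Nat) (hi : i < xs.length) (v : Int) :
    (xs.set i v).take (i + 1) = xs.take i ++ [v] := by
  rw [List.set_eq_take_cons_drop v hi]
  have hl : (xs.take i).length = i := by simp [Nat.le_of_lt hi]
  rw [show i + 1 = (xs.take i).length + 1 by rw [hl], List.take_append]
  simp

lemma pv_pySetD_neg_one (xs : List Int) (h : xs ≠ []) (v : Int) :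
    PySem.List.pySetD xs (-1) v = xs.set (xs.length - 1) v := by
  have h1 : 1 ≤ xs.length := List.length_pos_iff.mpr h
  simp [PySem.List.pySetD, PySem.List.pySet?, PySem.List.pyIdx?, h1]

lemma pv_pyGetD_neg_one (xs : List Int) (h : xs ≠ []) :
    PySem.List.pyGetD xs (-1) (0 : Int) = xs.getD (xs.length - 1) 0 := by
  have h1 : xs.length - 1 < xs.length := by
    have := List.length_pos_iff.mpr h; omega
  simp only [ne_eq, h, not_false_eq_true, PySem.List.pyGetD_neg_one, List.getD_eq_getElem?_getD]
  rw [List.getLast_eq_getElem, List.getElem?_eq_getElem h1]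
  rfl

lemma pv_base (h' : Nat) (amt : Int) (state : List Int) (hne : state ≠ [])
    (hge : state.length ≤ h' + 1) :
    newState (↑h') amt state = newState_alt (↑h') amt state := by
  have hpos : 0 < state.length := List.length_pos_iff.mpr hne
  have hr : PySem.List.pyRange (↑h') ((state.length : Int) - 1) 1 = [] :=
    PySem.List.pyRange_one_eq_nil (by omega)
  have hn1 : ((state.length : Int) - 1) = ((state.length - 1 : Nat) : Int) := by omega
  simp only [newState, newState_alt, hr, newStateGo, List.find?_nil]
  have hb : ¬ ((h' : Int) < (state.length : Int) - 1) := by omega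
  rw [if_neg hb]
  by_cases ha : amt > 0
  · rw [if_pos ha, if_pos ha]
    rw [pv_pySetD_neg_one state hne, pv_pyGetD_neg_one state hne, hn1]
    rw [PySem.List.pySetD_natCast]
    congr 1
    rw [PySem.List.pyGetD_natCast]
  · rw [if_neg ha, if_neg ha]

lemma pv_break (h' : Nat) (amt : Int) (state : List Int)
    (hlt : h' + 1 < state.length)
    (hyes : state.getD h' 0 - state.getD (h' + 1) 0 ≥ amt) :
    newState (↑h') amt state = newState_alt (↑h') amt state := by
  have hcons : PySem.List.pyRange (↑h') ((state.length : Int) - 1) 1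
      = (↑h') :: PySem.List.pyRange ((↑h') + 1) ((state.length : Int) - 1) 1 :=
    PySem.List.pyRange_one_cons (by omega)
  have hcast : ((h' : Int) + 1) = ((h' + 1 : Nat) : Int) := by push_cast; ring
  simp only [newState, newState_alt, hcons, newStateGo, List.find?, hcast,
    PySem.List.pyGetD_natCast]
  rw [if_pos hyes]
  have hcond : (decide (state.getD h' 0 - state.getD (h' + 1) 0 ≥ amt)) = true := by
    simpa using hyes
  simp only [hcond]
  rw [if_neg (by omega : ¬ (0:Int) > 0)]
  simp only [hcast]
  rw [PySem.List.pySetD_natCast, PySem.List.slice_to_natCast,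
    PySem.List.slice_natCast, PySem.List.slice_from_natCast]
  rw [List.set_eq_take_cons_drop _ (by omega : h' < state.length)]
  simp

lemma pv_stepA (h' : Nat) (amt : Int) (state : List Int)
    (hlt : h' + 1 < state.length)
    (hno : ¬ (state.getD h' 0 - state.getD (h' + 1) 0 ≥ amt)) :
    newState (↑h') amt state =
      newState (↑(h' + 1)) (amt - (state.getD h' 0 - state.getD (h' + 1) 0))
        (state.set h' (state.getD (h' + 1) 0)) := by
  have hcast : ((h' : Int) + 1) = ((h' + 1 : Nat) : Int) := by push_cast; ring
  have hcons : PySem.List.pyRange (↑h') ((state.length : Int) - 1) 1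
      = (↑h') :: PySem.List.pyRange ((↑h') + 1) ((state.length : Int) - 1) 1 :=
    PySem.List.pyRange_one_cons (by omega)
  have hv : state.getD h' 0 - (state.getD h' 0 - state.getD (h' + 1) 0) = state.getD (h' + 1) 0 := by
    ring
  simp only [newState, List.length_set, hcons, newStateGo, PySem.List.pyGetD_natCast,
    PySem.List.pySetD_natCast, hcast]
  rw [if_neg hno, hv]

lemma pv_stepB (h' : Nat) (amt : Int) (state : List Int)
    (hlt : h' + 1 < state.length)
    (hno : ¬ (state.getD h' 0 - state.getD (h' + 1) 0 ≥ amt)) :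
    newState_alt (↑h') amt state =
      newState_alt (↑(h' + 1)) (amt - (state.getD h' 0 - state.getD (h' + 1) 0))
        (state.set h' (state.getD (h' + 1) 0)) := by
  have hcast : ((h' : Int) + 1) = ((h' + 1 : Nat) : Int) := by push_cast; ring
  have hcons : PySem.List.pyRange (↑h') ((state.length : Int) - 1) 1
      = (↑h') :: PySem.List.pyRange ((↑h') + 1) ((state.length : Int) - 1) 1 :=
    PySem.List.pyRange_one_cons (by omega)
  simp only [newState_alt, List.length_set, hcons, List.find?, PySem.List.pyGetD_natCast, hcast]
  have hc0 : (decide (state.getD h' 0 - state.getD (h' + 1) 0 ≥ amt)) = false := by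
    simpa using hno
  simp only [hc0]
  have hcong : ∀ j ∈ PySem.List.pyRange (↑(h' + 1)) ((state.length:Int) - 1) 1,
      (fun j => decide ((state.set h' (state.getD (h' + 1) 0)).getD (h' + 1) 0 -
        PySem.List.pyGetD (state.set h' (state.getD (h' + 1) 0)) (j + 1) 0 ≥
          amt - (state.getD h' 0 - state.getD (h' + 1) 0))) j
      = (fun j => decide (state.getD h' 0 - PySem.List.pyGetD state (j + 1) 0 ≥ amt)) j := by
    intro j hj
    rw [PySem.List.mem_pyRange_one] at hj
    have hj1 : (0:Int) ≤ j + 1 := by omega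
    have hm : h' ≠ (j + 1).toNat := by omega
    simp only
    rw [PySem.List.pyGetD_eq_getElem _ _ hj1 (by simp only [List.length_set]; omega),
        PySem.List.pyGetD_eq_getElem _ _ hj1 (by omega),
        pv_getD_set_ne _ _ _ _ (by omega : h' ≠ h' + 1)]
    rw [List.getElem_set_ne hm]
    apply decide_eq_decide.mpr
    constructor <;> intro <;> omega
  rw [pv_find?_congr _ _ _ hcong]
  cases hf : List.find? (fun j => decide (state.getD h' 0 - PySem.List.pyGetD state (j + 1) 0 ≥ amt))
      (PySem.List.pyRange (↑(h' + 1)) ((state.length:Int) - 1) 1) with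
  | some j =>
    have hmem := List.mem_of_find?_eq_some hf
    rw [PySem.List.mem_pyRange_one] at hmem
    have hjj : j = ((j.toNat : Nat) : Int) := (Int.toNat_of_nonneg (by omega)).symm
    simp only
    rw [hjj]
    have c1 : ((j.toNat:Int) + 1) = ((j.toNat+1 : Nat) : Int) := by push_cast; ring
    have c2 : ((h'+1:Nat):Int) + 1 = ((h'+2 : Nat):Int) := by push_cast; ring
    rw [c1, c2]
    rw [PySem.List.slice_to_natCast, PySem.List.slice_natCast, PySem.List.slice_from_natCast,
        PySem.List.slice_to_natCast, PySem.List.slice_natCast, PySem.List.slice_from_natCast]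
    rw [pv_take_succ_set _ _ (by omega) _,
        List.drop_set_of_lt (by omega : h' < h' + 2),
        List.drop_set_of_lt (by omega : h' < j.toNat + 1),
        pv_getD_set_ne _ _ _ _ (by omega : h' ≠ h' + 1)]
    rw [show state.getD (h' + 1) 0 - (amt - (state.getD h' 0 - state.getD (h' + 1) 0))
        = state.getD h' 0 - amt from by ring]
    rw [show j.toNat + 1 - (h' + 1) = (j.toNat + 1 - (h' + 2)) + 1 from by omega]
    rw [List.drop_eq_getElem_cons (by omega : h' + 1 < state.length), List.take_succ_cons]
    rw [List.getD_eq_getElem state 0 (by omega : h' + 1 < state.length)]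
    simp [List.append_assoc]
  | none =>
    simp only
    rw [if_pos (by omega : (↑h' : Int) < (state.length:Int) - 1)]
    have c2 : ((h'+1:Nat):Int) + 1 = ((h'+2 : Nat):Int) := by push_cast; ring
    rw [c2]
    by_cases h2 : ((h' + 1 : Nat) : Int) < (state.length : Int) - 1
    · rw [if_pos h2]
      rw [PySem.List.slice_to_natCast, PySem.List.slice_from_natCast,
          PySem.List.slice_to_natCast, PySem.List.slice_from_natCast]
      rw [pv_take_succ_set _ _ (by omega) _,
          List.drop_set_of_lt (by omega : h' < h' + 2),
          pv_getD_set_ne _ _ _ _ (by omega : h' ≠ h' + 1)]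
      rw [show state.getD (h' + 1) 0 - (amt - (state.getD h' 0 - state.getD (h' + 1) 0))
          = state.getD h' 0 - amt from by ring]
      rw [List.drop_eq_getElem_cons (by omega : h' + 1 < state.length)]
      rw [List.getD_eq_getElem state 0 (by omega : h' + 1 < state.length)]
      simp [List.append_assoc]
    · rw [if_neg h2]
      have hgt : amt - (state.getD h' 0 - state.getD (h' + 1) 0) > 0 := by omega
      rw [if_pos hgt]
      have hne2 : state.set h' (state.getD (h' + 1) 0) ≠ [] := by
        have hl2 : (state.set h' (state.getD (h' + 1) 0)).length = state.length := by simp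
        intro hnil
        rw [hnil] at hl2
        simp at hl2
        omega
      rw [pv_pySetD_neg_one _ hne2, pv_pyGetD_neg_one _ hne2]
      simp only [List.length_set]
      rw [show state.length - 1 = h' + 1 from by omega]
      rw [pv_getD_set_ne _ _ _ _ (by omega : h' ≠ h' + 1)]
      rw [show state.getD (h' + 1) 0 - (amt - (state.getD h' 0 - state.getD (h' + 1) 0))
          = state.getD h' 0 - amt from by ring]
      rw [PySem.List.slice_to_natCast, PySem.List.slice_from_natCast]
      rw [List.set_eq_take_cons_drop _ (by simp only [List.length_set]; omega :
        h' + 1 < (state.set h' (state.getD (h' + 1) 0)).length)]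
      rw [pv_take_succ_set _ _ (by omega) _, List.drop_set_of_lt (by omega : h' < h' + 2)]
      rw [List.drop_eq_getElem_cons (by omega : h' + 1 < state.length)]
      rw [List.drop_eq_nil_of_le (by omega : state.length ≤ h' + 2),
        List.getD_eq_getElem state 0 (by omega : h' + 1 < state.length)]

lemma pv_key (k : Nat) : ∀ (h' : Nat) (amt : Int) (state : List Int), state ≠ [] →
    state.length ≤ k + h' → newState (↑h') amt state = newState_alt (↑h') amt state := by
  induction k with
  | zero =>
    intro h' amt state hne hlen
    exact pv_base h' amt state hne (by omega)
  | succ k ih =>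
    intro h' amt state hne hlen
    by_cases hlt : h' + 1 < state.length
    · by_cases hyes : state.getD h' 0 - state.getD (h' + 1) 0 ≥ amt
      · exact pv_break h' amt state hlt hyes
      · rw [pv_stepA h' amt state hlt hyes, pv_stepB h' amt state hlt hyes]
        apply ih (h' + 1) _ _
        · have hl2 : (state.set h' (state.getD (h' + 1) 0)).length = state.length := by simp
          intro hnil
          rw [hnil] at hl2
          simp at hl2
          omega
        · simp only [List.length_set]
          omega
    · exact pv_base h' amt state hne (by omega)

-- ===== VERDICT (by name: the statement is the Claim_ definition above) =====
theorem newState_spec : Claim_equal_newState := by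
  intro heapIndex amount state _ hpre
  obtain ⟨hge, hemp⟩ := hpre
  unfold Spec_newState
  cases state with
  | nil =>
    have ha : amount ≤ 0 := hemp rfl
    have hr : PySem.List.pyRange heapIndex (((List.nil : List Int).length : Int) - 1) 1 = [] :=
      PySem.List.pyRange_one_eq_nil (by simp; omega)
    have h1 : ¬ ((0:Int) < amount) := by omega
    simp only [newState, newState_alt, hr, newStateGo, List.find?_nil]
    rw [if_neg (by simp; omega : ¬ (heapIndex < ((List.nil : List Int).length : Int) - 1))]
    split_ifs with hif
    · omega
    · rfl
  | cons a t =>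
    have hkey := pv_key (a :: t).length heapIndex.toNat amount (a :: t) (by simp) (by omega)
    rwa [Int.toNat_of_nonneg hge] at hkey
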